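-- pv_equiv track=rewrite | github.com/Nama21yo/Natnael_CP | B_Gorilla_and_the_Exam.py | gorilla_exam
-- ===== SOURCE A (Python) =====
-- from collections import defaultdict
--
-- def gorilla_exam(nums, n, k):
--     count_arr = defaultdict(int)
--     # Count the elements
--     for num in nums:
--         count_arr[num] += 1
--
--     # Approach - Be greedy
--     # 1. pick a number with least frequency
--     # 2. overide that number with the element that have the largest freq
--     # 3. return the number of distinct elements
--
--     # Create a list of frequencies sorted in increasing order
--     frequencies = sorted(count_arr.values())
--
--     # Reduce distinct elements using available k operations
--     distinct_count = len(frequencies)  # Initial distinct elements count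
--     for freq in frequencies:
--         if k >= freq:
--             k -= freq  # We can eliminate this number completely
--             distinct_count -= 1  # One distinct element removed
--         else:
--             break  # No more operations can affect further numbers
--
--     return distinct_count if distinct_count != 0 else 1
-- ===== SOURCE B (Python) =====
-- from collections import Counter
--
--
-- def gorilla_exam(nums, n, k):
--     # Bucket-by-frequency: no sort; walk frequency levels 1..maxf,
--     # removing whole groups of equally-frequent values at once.
--     freq = Counter(nums)
--     distinct = len(freq)
--     if distinct == 0:
--         return 1
--     levels = Counter(freq.values())  # levels[f] = number of distinct values occurring exactly f times
--     maxf = max(freq.values())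
--     for f in range(1, maxf + 1):
--         c = levels[f]
--         if c == 0:
--             continue
--         if k < f:
--             break
--         take = min(c, k // f)
--         k -= take * f
--         distinct -= take
--         if take < c:
--             break
--     return distinct if distinct != 0 else 1
-- ===== Notes on version B (the rewrite author's own statement) =====
-- stated objective: alternative
-- what changed: Replaces sorting the frequency list and scanning it one value at a time with a frequency-of-frequencies bucket table walked level by level, removing whole groups of equally-frequent values with a single division per level.
import Mathlib
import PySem

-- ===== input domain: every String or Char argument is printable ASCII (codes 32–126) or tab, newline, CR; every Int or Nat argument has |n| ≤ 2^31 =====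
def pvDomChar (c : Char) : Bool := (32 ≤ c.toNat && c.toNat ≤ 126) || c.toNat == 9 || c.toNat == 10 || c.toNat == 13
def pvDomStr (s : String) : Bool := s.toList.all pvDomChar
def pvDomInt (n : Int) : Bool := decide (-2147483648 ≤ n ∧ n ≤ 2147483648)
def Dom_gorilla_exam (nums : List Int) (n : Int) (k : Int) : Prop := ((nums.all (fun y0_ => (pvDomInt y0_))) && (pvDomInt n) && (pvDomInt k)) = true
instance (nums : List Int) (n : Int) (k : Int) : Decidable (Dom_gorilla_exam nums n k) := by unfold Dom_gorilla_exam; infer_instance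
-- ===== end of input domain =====

-- B replaces A's sort-then-greedy scan by a bucket table indexed by frequency, removing whole
-- groups of equally-frequent values per step (alternative decomposition; same return value).

-- ===== PORT A =====
-- the 'for freq in frequencies' loop: state (k, distinct_count); 'break' returns the state
def gorillaALoop : List Int → Int → Int → Int × Int
  | [], k, d => (k, d)
  | f :: rest, k, d => if k ≥ f then gorillaALoop rest (k - f) (d - 1) else (k, d)

def gorilla_exam (nums : List Int) (n : Int) (k : Int) : Int :=
  let count_arr := nums.foldl (fun d num => d.modify num 0 (· + 1)) PySem.Dict.empty
  let frequencies := PySem.List.sorted count_arr.values (fun x => x)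
  let distinct_count : Int := (frequencies.length : Int)
  let distinct_count := (gorillaALoop frequencies k distinct_count).2
  if distinct_count ≠ 0 then distinct_count else 1

-- ===== PORT B =====
-- the 'for f in range(1, maxf + 1)' loop of Source B; 'continue'/'break' as in the source
def gorillaBLoop : List Int → PySem.Dict Int Int → Int → Int → Int
  | [], _, _, d => d
  | f :: rest, levels, k, d =>
    let c := levels.getD f 0
    if c = 0 then gorillaBLoop rest levels k d
    else if k < f then d
    else
      let take := min c (PySem.Int.floordiv k f)
      let d' := d - take
      if take < c then d' else gorillaBLoop rest levels (k - take * f) d'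

def gorilla_exam_alt (nums : List Int) (n : Int) (k : Int) : Int :=
  let freq := PySem.Dict.counter nums
  let distinct : Int := (freq.size : Int)
  if distinct = 0 then 1
  else
    -- freq.values ≠ [] here, so Python's max cannot raise; the .getD 0 default is unreachable
    let levels := PySem.Dict.counter freq.values
    let maxf := (PySem.List.max? freq.values (fun x => x)).getD 0
    let distinct := gorillaBLoop (PySem.List.pyRange 1 (maxf + 1)) levels k distinct
    if distinct ≠ 0 then distinct else 1

-- ===== PRECONDITION & SPEC =====
def Spec_gorilla_exam (nums : List Int) (n : Int) (k : Int) (out : Int) : Prop := out = gorilla_exam_alt nums n k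
instance (nums : List Int) (n : Int) (k : Int) (out : Int) : Decidable (Spec_gorilla_exam nums n k out) := by unfold Spec_gorilla_exam; infer_instance

-- ===== CLAIM (what is proved, stated in full; the proofs are below) =====
def Claim_equal_gorilla_exam : Prop := ∀ (nums : List Int) (n : Int) (k : Int), Dom_gorilla_exam nums n k → Spec_gorilla_exam nums n k (gorilla_exam nums n k)

-- ===== LEMMAS AND PROOFS =====

-- pyRange a b (step 1) is strictly increasing
lemma pyRange_pairwise_lt (a b : Int) : List.Pairwise (· < ·) (PySem.List.pyRange a b) := by
  have H : ∀ (c : Nat) (a : Int), (b - a).toNat = c → List.Pairwise (· < ·) (PySem.List.pyRange a b) := by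
    intro c
    induction c with
    | zero =>
      intro a ha
      have hnil : PySem.List.pyRange a b = [] := by
        refine List.eq_nil_iff_forall_not_mem.mpr (fun x hx => ?_)
        have := PySem.List.mem_pyRange_one.mp hx
        omega
      simp [hnil]
    | succ c ih =>
      intro a ha
      have hab : a < b := by omega
      rw [PySem.List.pyRange_one_cons hab]
      refine List.Pairwise.cons (fun x hx => ?_) (ih (a + 1) (by omega))
      have := PySem.List.mem_pyRange_one.mp hx
      omega
  exact H _ a rfl

-- A's loop runs through a whole block of c copies of f when the budget suffices
lemma aloop_block_all (f : Int) (hf : 0 < f) (c : Nat) :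
    ∀ (rest : List Int) (k d : Int), (c : Int) * f ≤ k →
    gorillaALoop (List.replicate c f ++ rest) k d = gorillaALoop rest (k - c * f) (d - c) := by
  induction c with
  | zero => intro rest k d _; simp
  | succ c ih =>
    intro rest k d h
    have hcf : (0 : Int) ≤ (c : Int) * f := by positivity
    have hfk : f ≤ k := by push_cast at h; nlinarith
    rw [List.replicate_succ, List.cons_append, gorillaALoop, if_pos (by omega)]
    rw [ih rest (k - f) (d - 1) (by push_cast at h ⊢; nlinarith)]
    congr 1 <;> push_cast <;> ring

-- A's loop stops inside a block: it removes exactly k / f copies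
lemma aloop_block_stop (f : Int) (hf : 0 < f) (c : Nat) :
    ∀ (rest : List Int) (k d : Int), 0 ≤ k → k < (c : Int) * f →
    (gorillaALoop (List.replicate c f ++ rest) k d).2 = d - k / f := by
  induction c with
  | zero => intro rest k d h0 h1; simp at h1; omega
  | succ c ih =>
    intro rest k d h0 h1
    rw [List.replicate_succ, List.cons_append, gorillaALoop]
    by_cases hkf : k ≥ f
    · rw [if_pos hkf, ih rest (k - f) (d - 1) (by omega) (by push_cast at h1 ⊢; nlinarith)]
      have : (k - f + 1 * f) / f = (k - f) / f + 1 := Int.add_mul_ediv_right _ _ (by omega)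
      simp at this
      omega
    · rw [if_neg hkf]
      have : k / f = 0 := Int.ediv_eq_zero_of_lt h0 (by omega)
      simp [this]

-- the two loops agree on the block decomposition
lemma loop_eq (L : List Int) :
    ∀ (fs : List Int) (k d : Int), (∀ f ∈ fs, 0 < f) →
    (gorillaALoop (fs.flatMap (fun f => List.replicate (L.count f) f)) k d).2
      = gorillaBLoop fs (PySem.Dict.counter L) k d := by
  intro fs
  induction fs with
  | nil => intro k d _; simp [gorillaALoop, gorillaBLoop]
  | cons f rest ih =>
    intro k d hpos
    have hf : 0 < f := hpos f (by simp)
    have hrest : ∀ g ∈ rest, 0 < g := fun g hg => hpos g (by simp [hg])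
    rw [List.flatMap_cons, gorillaBLoop]
    simp only [PySem.Dict.getD_counter]
    by_cases hc : (L.count f : Int) = 0
    · rw [if_pos hc]
      have : L.count f = 0 := by exact_mod_cast hc
      rw [this]
      simpa using ih k d hrest
    · rw [if_neg hc]
      have hc' : L.count f ≠ 0 := by exact_mod_cast hc
      obtain ⟨c, hcc⟩ : ∃ c : Nat, L.count f = c + 1 := ⟨L.count f - 1, by omega⟩
      by_cases hk : k < f
      · rw [if_pos hk, hcc, List.replicate_succ, List.cons_append, gorillaALoop,
          if_neg (by omega)]
      · rw [if_neg hk]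
        rw [PySem.Int.floordiv_eq_ediv_of_pos hf]
        have hk0 : 0 ≤ k := by omega
        by_cases hq : k / f < (L.count f : Int)
        · have hmin : min (L.count f : Int) (k / f) = k / f := by omega
          rw [hmin, if_pos (by omega)]
          exact aloop_block_stop f hf (L.count f) _ k d hk0
            ((Int.ediv_lt_iff_lt_mul hf).mp hq)
        · have hmin : min (L.count f : Int) (k / f) = (L.count f : Int) := by omega
          have hle : (L.count f : Int) * f ≤ k :=
            (Int.le_ediv_iff_mul_le hf).mp (by omega)
          rw [hmin, if_neg (by omega)]
          rw [aloop_block_all f hf (L.count f) _ k d hle]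
          exact ih _ _ hrest

lemma count_flat (L : List Int) :
    ∀ (fs : List Int), List.Pairwise (· < ·) fs → ∀ v : Int,
    (fs.flatMap (fun f => List.replicate (L.count f) f)).count v
      = if v ∈ fs then L.count v else 0 := by
  intro fs
  induction fs with
  | nil => simp
  | cons f rest ih =>
    intro hpw v
    have hfr : ∀ g ∈ rest, f < g := fun g hg => (List.pairwise_cons.mp hpw).1 g hg
    simp only [List.flatMap_cons, List.count_append, List.count_replicate,
      ih (List.pairwise_cons.mp hpw).2 v, List.mem_cons]
    by_cases hv : v = f
    · simp only [hv, beq_self_eq_true, if_true]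
      have : f ∉ rest := fun h => absurd (hfr f h) (lt_irrefl f)
      simp [this]
    · simp [hv, Ne.symm hv]

lemma pairwise_flat (L : List Int) :
    ∀ (fs : List Int), List.Pairwise (· < ·) fs →
    List.Pairwise (· ≤ ·) (fs.flatMap (fun f => List.replicate (L.count f) f)) := by
  intro fs
  induction fs with
  | nil => simp
  | cons f rest ih =>
    intro hpw
    have hfr : ∀ g ∈ rest, f < g := fun g hg => (List.pairwise_cons.mp hpw).1 g hg
    rw [List.flatMap_cons]
    refine List.pairwise_append.mpr ⟨?_, ih (List.pairwise_cons.mp hpw).2, ?_⟩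
    · exact List.pairwise_replicate.mpr (Or.inr le_rfl)
    · intro x hx y hy
      have hxf : x = f := List.eq_of_mem_replicate hx
      obtain ⟨g, hg, hyg⟩ := List.mem_flatMap.mp hy
      have hyg' : y = g := List.eq_of_mem_replicate hyg
      rw [hxf, hyg']
      exact le_of_lt (hfr g hg)

-- sorting a list of values in [1, m] is the concatenation of its frequency blocks
lemma sorted_decomp (L : List Int) (m : Int)
    (hpos : ∀ v ∈ L, 0 < v) (hmax : ∀ v ∈ L, v ≤ m) :
    PySem.List.sorted L (fun x => x)
      = (PySem.List.pyRange 1 (m + 1)).flatMap (fun f => List.replicate (L.count f) f) := by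
  have hpw := pyRange_pairwise_lt 1 (m + 1)
  refine PySem.List.eq_of_perm_of_pairwise_le_of_injective (fun x => x)
    (fun _ _ h => h) ?_ ?_ ?_
  · refine (PySem.List.sorted_perm L (fun x => x) false).trans (List.perm_iff_count.mpr ?_)
    intro v
    rw [count_flat L _ hpw v]
    by_cases hv : v ∈ PySem.List.pyRange 1 (m + 1)
    · simp [hv]
    · have : v ∉ L := fun hvL => hv (PySem.List.mem_pyRange_one.mpr
        ⟨by have := hpos v hvL; omega, by have := hmax v hvL; omega⟩)
      simp [hv, List.count_eq_zero.mpr this]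
  · exact PySem.List.sorted_pairwise L (fun x => x)
  · exact pairwise_flat L _ hpw

lemma values_counter_pos (nums : List Int) :
    ∀ v ∈ (PySem.Dict.counter nums).values, 0 < v := by
  intro v hv
  simp only [PySem.Dict.values, PySem.Dict.items_counter, List.map_map, List.mem_map] at hv
  obtain ⟨x, hx, hxv⟩ := hv
  have hxL : x ∈ nums := (PySem.Set.mem_ofList nums x).mp hx
  have : 0 < nums.count x := List.count_pos_iff.mpr hxL
  simp only [Function.comp] at hxv
  omega

-- ===== VERDICT (by name: the statement is the Claim_ definition above) =====
theorem gorilla_exam_spec : Claim_equal_gorilla_exam := by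
  intro nums n k _
  show gorilla_exam nums n k = gorilla_exam_alt nums n k
  simp only [gorilla_exam, gorilla_exam_alt, ← PySem.Dict.counter_eq_foldl]
  have hlenvals : (PySem.Dict.counter nums).values.length = (PySem.Dict.counter nums).size := by
    simp [PySem.Dict.values, PySem.Dict.size]
  by_cases hz : ((PySem.Dict.counter nums).size : Int) = 0
  · rw [if_pos hz]
    have hnil : (PySem.Dict.counter nums).values = [] := by
      apply List.eq_nil_of_length_eq_zero
      omega
    rw [hnil]
    simp [gorillaALoop, PySem.List.sorted]
  · rw [if_neg hz]
    set vals := (PySem.Dict.counter nums).values with hvals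
    have hvne : vals ≠ [] := by
      intro h
      rw [h] at hlenvals
      simp at hlenvals
      omega
    obtain ⟨m, hm⟩ : ∃ m, PySem.List.max? vals (fun x => x) = some m := by
      cases hmm : PySem.List.max? vals (fun x => x) with
      | none => exact absurd ((PySem.List.max?_eq_none_iff vals _).mp hmm) hvne
      | some m => exact ⟨m, rfl⟩
    rw [hm]
    simp only [Option.getD_some]
    have hpos := values_counter_pos nums
    have hmax : ∀ v ∈ vals, v ≤ m := fun v hv => PySem.List.max?_isMax hm v hv
    have hdec := sorted_decomp vals m hpos hmax
    have hlen : ((PySem.List.pyRange 1 (m + 1)).flatMap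
        (fun f => List.replicate (vals.count f) f)).length = vals.length := by
      rw [← hdec]
      exact (PySem.List.sorted_perm vals (fun x => x) false).length_eq
    rw [hdec, loop_eq vals _ k _
      (fun f hf => by have := PySem.List.mem_pyRange_one.mp hf; omega)]
    rw [hlen, hlenvals]
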